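-- pv_equiv track=rewrite | github.com/eight-atulya/atulya | atulya-cortex/cortex/affect.py | _stem_hits
-- ===== SOURCE A (Python) =====
-- from typing import Awaitable, Callable, Iterable
--
-- def _stem_hits(tokens: Iterable[str], stems: frozenset[str]) -> list[str]:
--     """Find tokens that *start with* any stem (cheap stemmer).
--
--     We use prefix matching rather than full-form matching so that
--     "frustrated"/"frustrating"/"frustration" all hit the "frustrat" stem
--     without us maintaining a giant lemma table.
--     """
--
--     hits: list[str] = []
--     for tok in tokens:
--         for stem in stems:
--             if tok.startswith(stem):
--                 hits.append(tok)
--                 break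
--     return hits
-- ===== SOURCE B (Python) =====
-- def _stem_hits(tokens, stems):
--     """Hash-set re-implementation: look each token's prefixes up by length
--     instead of scanning every stem per token."""
--     stem_set = set(stems)
--     lens = sorted({len(s) for s in stems})
--     return [t for t in tokens if any(t[:L] in stem_set for L in lens)]
-- ===== Notes on version B (the rewrite author's own statement) =====
-- stated objective: faster
-- what changed: B replaces the per-token linear scan over all stems with a hash set of stems looked up once per distinct stem length (token prefix by length), instead of calling startswith for every (token, stem) pair.
import Mathlib
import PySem

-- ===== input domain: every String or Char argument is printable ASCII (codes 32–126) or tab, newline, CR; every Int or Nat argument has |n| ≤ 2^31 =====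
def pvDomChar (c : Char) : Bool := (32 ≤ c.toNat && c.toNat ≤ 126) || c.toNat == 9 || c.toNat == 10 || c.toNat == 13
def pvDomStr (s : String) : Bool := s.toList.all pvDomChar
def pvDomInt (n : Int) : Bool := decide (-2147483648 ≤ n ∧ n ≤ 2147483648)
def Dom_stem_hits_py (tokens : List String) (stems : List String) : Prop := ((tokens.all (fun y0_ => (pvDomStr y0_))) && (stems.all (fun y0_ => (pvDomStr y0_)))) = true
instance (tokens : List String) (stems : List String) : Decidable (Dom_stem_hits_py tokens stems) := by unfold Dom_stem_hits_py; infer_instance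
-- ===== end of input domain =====

-- B replaces A's per-token scan over every stem with one stem hash-set queried per distinct stem length (objective: faster).


-- ===== PORT A =====
-- inner loop 'for stem in stems: if tok.startswith(stem): hits.append(tok); break'
-- rendered as a first-match scan returning whether the break (the append) fired
def stemScanA (tok : String) : List String → Bool
  | [] => false
  | stem :: rest => if PySem.Str.startswith tok stem then true else stemScanA tok rest

def stem_hits_py (tokens : List String) (stems : List String) : List String :=
  tokens.foldl (fun hits tok => if stemScanA tok stems then hits ++ [tok] else hits) []

-- ===== PORT B =====
def stem_hits_py_alt (tokens : List String) (stems : List String) : List String :=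
  let stemSet : PySem.Set String := PySem.Set.ofList stems
  let lens : List Int := PySem.List.sorted (PySem.Set.ofList (stems.map PySem.Str.len)) (fun x => x)
  tokens.filter (fun t =>
    lens.any (fun L => PySem.Set.contains stemSet (PySem.Str.slice t none (some L))))

-- ===== PRECONDITION & SPEC =====
def Spec_stem_hits_py (tokens : List String) (stems : List String) (out : List String) : Prop := out = stem_hits_py_alt tokens stems
instance (tokens : List String) (stems : List String) (out : List String) : Decidable (Spec_stem_hits_py tokens stems out) := by unfold Spec_stem_hits_py; infer_instance

-- ===== CLAIM (what is proved, stated in full; the proofs are below) =====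
def Claim_equal_stem_hits_py : Prop := ∀ (tokens : List String) (stems : List String), Dom_stem_hits_py tokens stems → Spec_stem_hits_py tokens stems (stem_hits_py tokens stems)

-- ===== LEMMAS AND PROOFS =====

-- A's inner scan fires exactly when some stem is a prefix of the token
theorem stemScanA_eq_true_iff (tok : String) (stems : List String) :
    stemScanA tok stems = true ↔ ∃ s ∈ stems, PySem.Str.startswith tok s = true := by
  induction stems with
  | nil => simp [stemScanA]
  | cons stem rest ih =>
      simp only [stemScanA]
      split_ifs with h
      · exact iff_of_true rfl ⟨stem, by simp, h⟩
      · rw [ih]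
        constructor
        · rintro ⟨s, hs, hp⟩; exact ⟨s, List.mem_cons_of_mem _ hs, hp⟩
        · rintro ⟨s, hs, hp⟩
          rcases List.mem_cons.mp hs with rfl | hs'
          · exact absurd hp h
          · exact ⟨s, hs', hp⟩

-- B's per-token test fires exactly when some stem is a prefix of the token
theorem altTest_eq_true_iff (t : String) (stems : List String) :
    ((PySem.List.sorted (PySem.Set.ofList (stems.map PySem.Str.len)) (fun x => x)).any
      (fun L => PySem.Set.contains (PySem.Set.ofList stems) (PySem.Str.slice t none (some L))) = true)
    ↔ ∃ s ∈ stems, PySem.Str.startswith t s = true := by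
  constructor
  · intro h
    obtain ⟨L, hL, hc⟩ := List.any_eq_true.mp h
    rw [PySem.List.mem_sorted, PySem.Set.mem_ofList, List.mem_map] at hL
    obtain ⟨s, hs, hlen⟩ := hL
    have hmem : PySem.Str.slice t none (some L) ∈ stems := by
      have := (PySem.Set.mem_ofList stems (PySem.Str.slice t none (some L))).mp
      exact this (by simpa [PySem.Set.contains, List.contains_eq_mem] using hc)
    refine ⟨_, hmem, ?_⟩
    have h0 : (0:Int) ≤ L := by
      rw [← hlen, PySem.Str.len_eq]; positivity
    rw [PySem.Str.startswith_eq, PySem.Chars.startswith_iff, PySem.Str.toList_slice,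
        PySem.Chars.slice_eq_listSlice, PySem.List.slice_to _ h0]
    exact List.take_prefix _ _
  · intro ⟨s, hs, hpre⟩
    apply List.any_eq_true.mpr
    refine ⟨PySem.Str.len s, ?_, ?_⟩
    · rw [PySem.List.mem_sorted, PySem.Set.mem_ofList]
      exact List.mem_map.mpr ⟨s, hs, rfl⟩
    · have hp : s.toList <+: t.toList := by
        rw [PySem.Str.startswith_eq, PySem.Chars.startswith_iff] at hpre
        exact hpre
      have hslice : PySem.Str.slice t none (some (PySem.Str.len s)) = s := by
        apply String.toList_inj.mp
        rw [PySem.Str.toList_slice, PySem.Chars.slice_eq_listSlice, PySem.Str.len_eq,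
            PySem.List.slice_to _ (by positivity)]
        simpa using (List.prefix_iff_eq_take.mp hp).symm
      rw [hslice]
      simp [PySem.Set.contains, List.contains_eq_mem, hs]

-- ===== VERDICT (by name: the statement is the Claim_ definition above) =====
theorem stem_hits_py_spec : Claim_equal_stem_hits_py := by
  intro tokens stems _
  unfold Spec_stem_hits_py stem_hits_py stem_hits_py_alt
  rw [PySem.List.foldl_append_if_eq_filter (fun tok => stemScanA tok stems) tokens []]
  simp only [List.nil_append]
  apply List.filter_congr
  intro t _
  rw [Bool.eq_iff_iff, stemScanA_eq_true_iff, altTest_eq_true_iff]
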